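-- pv_equiv track=rewrite | github.com/thealper2/codewars-solutions | 7-kyu/down_arrow_with_numbers.py | get_a_down_arrow_of
-- ===== SOURCE A (Python) =====
-- def get_a_down_arrow_of(n):
--     pattern = []
--     for i in range(n):
--         max_num = n - i
--         line = []
--         for num in range(1, max_num + 1):
--             digit = num % 10
--             line.append(str(digit))
--         for num in range(max_num - 1, 0, -1):
--             digit = num % 10
--             line.append(str(digit))
--         indented_line = ' ' * i + ''.join(line)
--         pattern.append(indented_line)
--     return '\n'.join(pattern)
-- ===== SOURCE B (Python) =====
-- def get_a_down_arrow_of(n):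
--     # Closed form: row i has indent i and 2*(n-i)-1 digit cells; the digit at
--     # cell p is (m - |p - (m-1)|) % 10 with m = n - i (distance from the edges).
--     return '\n'.join(
--         ' ' * i + ''.join(str((n - i - abs(p - (n - i - 1))) % 10)
--                           for p in range(2 * (n - i) - 1))
--         for i in range(n))
-- ===== Notes on version B (the rewrite author's own statement) =====
-- stated objective: alternative
-- what changed: B computes each row in one pass from a closed-form per-cell formula (digit at cell p is (m-|p-(m-1)|) mod 10), eliminating A's two-phase ascending/descending construction entirely.
import Mathlib
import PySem

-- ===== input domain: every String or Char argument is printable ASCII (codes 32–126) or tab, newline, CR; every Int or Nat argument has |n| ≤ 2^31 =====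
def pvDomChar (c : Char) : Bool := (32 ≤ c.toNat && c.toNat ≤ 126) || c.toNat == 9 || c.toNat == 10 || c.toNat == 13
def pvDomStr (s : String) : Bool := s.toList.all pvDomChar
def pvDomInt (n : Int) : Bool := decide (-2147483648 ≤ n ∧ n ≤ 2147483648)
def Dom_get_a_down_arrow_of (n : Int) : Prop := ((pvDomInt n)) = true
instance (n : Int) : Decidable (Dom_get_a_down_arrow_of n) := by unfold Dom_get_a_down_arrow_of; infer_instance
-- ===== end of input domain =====

-- ===== PORT A =====
-- B computes each row in one pass from a closed-form per-cell formula instead of A's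
-- two-phase ascending/descending construction (objective: alternative).
def get_a_down_arrow_of (n : Int) : String :=
  let pattern : List String := (PySem.List.pyRange 0 n 1).foldl (fun pattern i =>
    let maxNum := n - i
    let line : List String := (PySem.List.pyRange 1 (maxNum + 1) 1).foldl
      (fun line num => line ++ [PySem.Int.toStr (PySem.Int.mod num 10)]) []
    let line := (PySem.List.pyRange (maxNum - 1) 0 (-1)).foldl
      (fun line num => line ++ [PySem.Int.toStr (PySem.Int.mod num 10)]) line
    -- ' ' * i : exact — i copies of the space character
    let indented_line := String.ofList (PySem.List.pyRepeat [' '] i) ++ PySem.Str.join "" line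
    pattern ++ [indented_line]) []
  PySem.Str.join "\n" pattern

-- ===== PORT B =====
def get_a_down_arrow_of_alt (n : Int) : String :=
  PySem.Str.join "\n" ((PySem.List.pyRange 0 n 1).map (fun i =>
    String.ofList (PySem.List.pyRepeat [' '] i) ++
    PySem.Str.join "" ((PySem.List.pyRange 0 (2 * (n - i) - 1) 1).map
      (fun p => PySem.Int.toStr (PySem.Int.mod (n - i - |p - (n - i - 1)|) 10)))))

-- ===== PRECONDITION & SPEC =====
def Spec_get_a_down_arrow_of (n : Int) (out : String) : Prop := out = get_a_down_arrow_of_alt n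
instance (n : Int) (out : String) : Decidable (Spec_get_a_down_arrow_of n out) := by unfold Spec_get_a_down_arrow_of; infer_instance

-- ===== CLAIM (what is proved, stated in full; the proofs are below) =====
def Claim_equal_get_a_down_arrow_of : Prop := ∀ (n : Int), Dom_get_a_down_arrow_of n → Spec_get_a_down_arrow_of n (get_a_down_arrow_of n)

-- ===== LEMMAS AND PROOFS =====

def pvDigitChar (k : Int) : Char := Char.ofNat (48 + (PySem.Int.mod k 10).toNat)

-- str(d) for a single digit 0 ≤ d < 10
theorem toChars_digit (d : Int) (h0 : 0 ≤ d) (h1 : d < 10) :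
    PySem.Int.toChars d = [Char.ofNat (48 + d.toNat)] := by
  interval_cases d <;> decide

-- chars of the joined digit-string list over any index list
theorem join_digits (l : List Int) :
    (PySem.Str.join "" (l.map (fun k => PySem.Int.toStr (PySem.Int.mod k 10)))).toList
      = l.map pvDigitChar := by
  rw [PySem.Str.toList_join]
  have h : (l.map (fun k => PySem.Int.toStr (PySem.Int.mod k 10))).map String.toList
      = (l.map pvDigitChar).map (fun c => [c]) := by
    simp only [List.map_map]
    refine List.map_congr_left ?_
    intro a _
    show (PySem.Int.toStr (PySem.Int.mod a 10)).toList = [pvDigitChar a]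
    rw [PySem.Int.toList_toStr,
      toChars_digit _ (PySem.Int.mod_nonneg a (by norm_num)) (PySem.Int.mod_lt a (by norm_num))]
    rfl
  rw [h]
  simpa using PySem.Chars.join_nil_singletons (l.map pvDigitChar)

-- ascending half of the tent formula: cells 0..m-1 carry values 1..m
theorem tent_asc (m : Int) :
    (PySem.List.pyRange 0 m 1).map (fun p => m - |p - (m - 1)|)
      = PySem.List.pyRange 1 (m + 1) 1 := by
  apply List.ext_getElem
  · simp [PySem.List.length_pyRange_one]
  · intro k h1 h2
    simp only [List.getElem_map, PySem.List.getElem_pyRange_one]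
    have hk : (k : Int) < m := by
      have := h2; simp [PySem.List.length_pyRange_one] at this; omega
    have : |(0 + (k:Int)) - (m - 1)| = (m - 1) - k := by
      rw [abs_of_nonpos (by omega)]; ring
    rw [this]; ring

-- descending half: cells m..2m-2 carry values m-1..1
theorem tent_desc (m : Int) (hm : (1:Int) ≤ m) :
    (PySem.List.pyRange m (2 * m - 1) 1).map (fun p => m - |p - (m - 1)|)
      = PySem.List.pyRange (m - 1) 0 (-1) := by
  rw [PySem.List.pyRange_neg_one]
  apply List.ext_getElem
  · simp [PySem.List.length_pyRange_one]; omega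
  · intro k h1 h2
    simp only [List.getElem_map, PySem.List.getElem_pyRange_one, List.getElem_range]
    have hk : (k : Int) < m - 1 := by
      have := h1; simp [PySem.List.length_pyRange_one] at this; omega
    have : |(m + (k:Int)) - (m - 1)| = (k:Int) + 1 := by
      rw [abs_of_nonneg (by omega)]; ring
    rw [this]; ring

-- the whole row: one tent-formula pass equals ascending ++ descending
theorem tent_split (m : Int) (hm : (1:Int) ≤ m) :
    (PySem.List.pyRange 0 (2 * m - 1) 1).map (fun p => m - |p - (m - 1)|)
      = PySem.List.pyRange 1 (m + 1) 1 ++ PySem.List.pyRange (m - 1) 0 (-1) := by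
  rw [PySem.List.pyRange_one_append 0 m (2 * m - 1) (by omega) (by omega),
    List.map_append, tent_asc m, tent_desc m hm]

-- ===== VERDICT (by name: the statement is the Claim_ definition above) =====
theorem get_a_down_arrow_of_spec : Claim_equal_get_a_down_arrow_of := by
  intro n _
  unfold Spec_get_a_down_arrow_of get_a_down_arrow_of get_a_down_arrow_of_alt
  simp only [PySem.List.foldl_append_singleton_eq_map, List.nil_append]
  refine congrArg _ (List.map_congr_left ?_)
  intro i hi
  have hib := (PySem.List.mem_pyRange_one.mp hi)
  have hm : (1:Int) ≤ n - i := by omega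
  apply String.ext
  simp only [String.toList_append, String.toList_ofList]
  rw [← List.map_append, join_digits]
  have : (PySem.List.pyRange 0 (2 * (n - i) - 1) 1).map
      (fun p => PySem.Int.toStr (PySem.Int.mod (n - i - |p - (n - i - 1)|) 10))
      = ((PySem.List.pyRange 0 (2 * (n - i) - 1) 1).map (fun p => n - i - |p - (n - i - 1)|)).map
        (fun k => PySem.Int.toStr (PySem.Int.mod k 10)) := by
    rw [List.map_map]; rfl
  rw [this, join_digits, tent_split (n - i) hm]
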